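-- pv_equiv track=rewrite | github.com/prabhat-gp/GFG | Strings/Strings Basic/5_uncommon_chars.py | UncommonChars
-- ===== SOURCE A (Python) =====
-- def UncommonChars(A, B):
--     mapA = {}
--     mapB = {}
--
--     for ch in A:
--         mapA[ch] = 1
--
--     for ch in B:
--         mapB[ch] = 1
--
--     ans = ""
--
--     for ch in range(ord('a'), ord('z')+1):
--         ch = chr(ch)
--         if mapA.get(ch, 0) != mapB.get(ch, 0):
--             ans += ch
--
--     if not ans:
--         return "-1"
--
--     ans = "".join(sorted(ans))
--     return ans
-- ===== SOURCE B (Python) =====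
-- def UncommonChars(A, B):
--     # Sorted distinct lowercase letters of each string, then a sorted-list merge
--     # keeping elements present in exactly one list; output is produced in order.
--     def merge(xs, ys):
--         if not xs:
--             return ys
--         if not ys:
--             return xs
--         if xs[0] == ys[0]:
--             return merge(xs[1:], ys[1:])
--         if xs[0] < ys[0]:
--             return [xs[0]] + merge(xs[1:], ys)
--         return [ys[0]] + merge(xs, ys[1:])
--
--     la = sorted({c for c in A if 'a' <= c <= 'z'})
--     lb = sorted({c for c in B if 'a' <= c <= 'z'})
--     out = merge(la, lb)
--     return "".join(out) if out else "-1"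
-- ===== Notes on version B (the rewrite author's own statement) =====
-- stated objective: alternative
-- what changed: Instead of two presence dicts read back over a fixed 26-letter alphabet scan plus a final sort, B builds each string's sorted distinct lowercase letters and merges the two sorted lists, emitting in order exactly the elements present in one list but not the other (no alphabet scan, no final sort).
import Mathlib
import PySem

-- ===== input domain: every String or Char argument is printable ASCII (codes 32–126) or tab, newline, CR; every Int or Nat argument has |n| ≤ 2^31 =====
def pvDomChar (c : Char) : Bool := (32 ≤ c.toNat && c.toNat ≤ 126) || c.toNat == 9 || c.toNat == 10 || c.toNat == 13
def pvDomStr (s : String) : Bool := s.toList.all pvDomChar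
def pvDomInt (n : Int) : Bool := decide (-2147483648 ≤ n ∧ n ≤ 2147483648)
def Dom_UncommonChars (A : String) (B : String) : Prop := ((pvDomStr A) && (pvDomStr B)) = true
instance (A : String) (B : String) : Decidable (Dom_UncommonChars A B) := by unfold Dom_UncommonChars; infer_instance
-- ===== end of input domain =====

-- B replaces A's presence dicts + fixed a–z alphabet scan + final sort by a sorted-list
-- merge of each string's sorted distinct lowercase letters, emitting in order exactly the
-- elements present in one list but not the other (alternative algorithm; same value).

-- ===== PORT A =====
def UncommonChars (A : String) (B : String) : String :=
  let mapA : PySem.Dict Char Int := A.toList.foldl (fun d ch => d.insert ch 1) PySem.Dict.empty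
  let mapB : PySem.Dict Char Int := B.toList.foldl (fun d ch => d.insert ch 1) PySem.Dict.empty
  let ans : List Char := (PySem.List.pyRange 97 123).foldl
    (fun ans chI =>
      let ch := Char.ofNat chI.toNat
      if mapA.getD ch 0 ≠ mapB.getD ch 0 then ans ++ [ch] else ans) []
  if ans = [] then "-1" else String.ofList (PySem.List.sorted ans (fun x => x))

-- ===== PORT B =====
-- Source B's recursive merge helper: elements of two sorted lists present in exactly one
def pvMerge : List Char → List Char → List Char
  | [], ys => ys
  | xs, [] => xs
  | x :: xs, y :: ys =>
    if x = y then pvMerge xs ys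
    else if x < y then x :: pvMerge xs (y :: ys)
    else y :: pvMerge (x :: xs) ys
termination_by xs ys => xs.length + ys.length

def UncommonChars_alt (A : String) (B : String) : String :=
  let la : List Char :=
    PySem.List.sorted (PySem.Set.ofList (A.toList.filter (fun c => 'a' ≤ c ∧ c ≤ 'z'))) (fun x => x)
  let lb : List Char :=
    PySem.List.sorted (PySem.Set.ofList (B.toList.filter (fun c => 'a' ≤ c ∧ c ≤ 'z'))) (fun x => x)
  let out := pvMerge la lb
  if out = [] then "-1" else String.ofList out

-- ===== PRECONDITION & SPEC =====
def Spec_UncommonChars (A : String) (B : String) (out : String) : Prop := out = UncommonChars_alt A B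
instance (A : String) (B : String) (out : String) : Decidable (Spec_UncommonChars A B out) := by unfold Spec_UncommonChars; infer_instance

-- ===== CLAIM (what is proved, stated in full; the proofs are below) =====
def Claim_equal_UncommonChars : Prop := ∀ (A : String) (B : String), Dom_UncommonChars A B → Spec_UncommonChars A B (UncommonChars A B)

-- ===== LEMMAS AND PROOFS =====

-- the 26 lowercase letters, as A's range-loop produces them
def pvAlpha : List Char :=
  ['a','b','c','d','e','f','g','h','i','j','k','l','m',
   'n','o','p','q','r','s','t','u','v','w','x','y','z']

lemma pvRange_map : (PySem.List.pyRange 97 123).map (fun i => Char.ofNat i.toNat) = pvAlpha := by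
  decide

-- A's append-if loop over mapped elements is filter-of-map
lemma pvFoldl_if_mem (l : List Int) (g : Int → Char) (q : Char → Prop) [DecidablePred q]
    (acc : List Char) :
    l.foldl (fun ans i => if q (g i) then ans ++ [g i] else ans) acc
      = acc ++ (l.map g).filter (fun c => decide (q c)) := by
  induction l generalizing acc with
  | nil => simp
  | cons x xs ih =>
      simp only [List.foldl_cons, List.map_cons, List.filter_cons, ih]
      by_cases h : q (g x)
      · simp [h]
      · simp [h]

-- A's presence dict reads back membership
lemma pvGetD_fold (xs : List Char) (c : Char) :
    (xs.foldl (fun d ch => d.insert ch (1:Int)) PySem.Dict.empty).getD c 0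
      = if c ∈ xs then 1 else 0 := by
  have main : ∀ (d : PySem.Dict Char Int),
      (xs.foldl (fun d ch => d.insert ch (1:Int)) d).getD c 0
        = if c ∈ xs then 1 else d.getD c 0 := by
    induction xs with
    | nil => intro d; simp
    | cons x xs ih =>
        intro d
        simp only [List.foldl_cons, ih, PySem.Dict.getD_insert, List.mem_cons]
        by_cases hx : c = x
        · by_cases hm : c ∈ xs <;> simp [hx]
        · by_cases hm : c ∈ xs <;> simp [hx, hm]
  rw [main]
  by_cases hm : c ∈ xs <;>
    simp [hm, PySem.Dict.getD, PySem.Dict.get?, PySem.Dict.empty]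

lemma pvMem_alpha (x : Char) : x ∈ pvAlpha ↔ 'a' ≤ x ∧ x ≤ 'z' := by
  constructor
  · intro h; fin_cases h <;> exact ⟨by decide, by decide⟩
  · rintro ⟨h1, h2⟩
    rw [Char.le_def, UInt32.le_iff_toNat_le] at h1 h2
    have hn1 : 97 ≤ x.toNat := h1
    have hn2 : x.toNat ≤ 122 := h2
    rw [← Char.ofNat_toNat x]
    generalize x.toNat = n at hn1 hn2
    interval_cases n <;> decide

-- the list A actually returns (when nonempty): alphabet filtered by xor-membership
lemma pvAnsA (A B : String) :
    (PySem.List.pyRange 97 123).foldl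
      (fun ans chI =>
        if (A.toList.foldl (fun d ch => d.insert ch (1:Int)) PySem.Dict.empty).getD
              (Char.ofNat chI.toNat) 0
             ≠ (B.toList.foldl (fun d ch => d.insert ch (1:Int)) PySem.Dict.empty).getD
              (Char.ofNat chI.toNat) 0
        then ans ++ [Char.ofNat chI.toNat] else ans) []
      = pvAlpha.filter (fun c => decide (¬ (c ∈ A.toList ↔ c ∈ B.toList))) := by
  rw [pvFoldl_if_mem (PySem.List.pyRange 97 123) (fun i => Char.ofNat i.toNat)
        (fun ch => (A.toList.foldl (fun d ch => d.insert ch (1:Int)) PySem.Dict.empty).getD ch 0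
          ≠ (B.toList.foldl (fun d ch => d.insert ch (1:Int)) PySem.Dict.empty).getD ch 0) [],
      pvRange_map, List.nil_append]
  apply List.filter_congr
  intro c _
  simp only [pvGetD_fold, decide_eq_decide]
  by_cases ha : c ∈ A.toList <;> by_cases hb : c ∈ B.toList <;> simp [ha, hb]

lemma pvPairwiseAlphaFilter (p : Char → Bool) : (pvAlpha.filter p).Pairwise (· < ·) :=
  List.Pairwise.filter _ (by decide)

-- B's sorted distinct lowercase letters of a string = alphabet filtered by membership
lemma pvSortedSet (l : List Char) :
    PySem.List.sorted (PySem.Set.ofList (l.filter (fun c => 'a' ≤ c ∧ c ≤ 'z'))) (fun x => x)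
      = pvAlpha.filter (fun c => decide (c ∈ l)) := by
  apply PySem.List.sorted_eq_of_perm_of_pairwise_lt
  · rw [List.perm_ext_iff_of_nodup]
    · intro c
      simp only [List.mem_filter, pvMem_alpha, PySem.Set.mem_ofList, decide_eq_true_eq]
      tauto
    · exact (pvPairwiseAlphaFilter _).nodup
    · exact PySem.Set.nodup_ofList _
  · exact pvPairwiseAlphaFilter _

lemma pvMerge_nil_right (l : List Char) : pvMerge l [] = l := by
  cases l <;> simp [pvMerge]

lemma pvMerge_nil_left (l : List Char) : pvMerge [] l = l := by
  cases l <;> simp [pvMerge]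

-- merging two filters of the same strictly sorted list keeps exactly the xor
lemma pvMerge_filter (p q : Char → Bool) :
    ∀ (l : List Char), l.Pairwise (· < ·) →
      pvMerge (l.filter p) (l.filter q) = l.filter (fun c => p c != q c) := by
  intro l hl
  induction l with
  | nil => simp [pvMerge]
  | cons x xs ih =>
      have hx : ∀ y ∈ xs, x < y := (List.pairwise_cons.mp hl).1
      have hxs := ih ((List.pairwise_cons.mp hl).2)
      have hq : ∀ y ∈ xs.filter q, x < y := fun y hy => hx y (List.mem_filter.mp hy).1
      have hp : ∀ y ∈ xs.filter p, x < y := fun y hy => hx y (List.mem_filter.mp hy).1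
      simp only [List.filter_cons]
      by_cases hpx : p x = true <;> by_cases hqx : q x = true <;>
        simp only [hpx, hqx, if_pos, Bool.false_eq_true, bne_self_eq_false] <;>
        simp only [ite_false]
      · -- both present: heads equal, skip both
        simp [pvMerge, hxs]
      · -- only in p: x precedes every element of xs.filter q
        cases hfq : xs.filter q with
        | nil =>
            rw [hfq, pvMerge_nil_right] at hxs
            simp [pvMerge_nil_right, hxs]
        | cons y ys =>
            have hxy : x < y := hq y (by rw [hfq]; exact List.mem_cons_self)
            simp [pvMerge, hxy, ne_of_lt hxy, hfq ▸ hxs]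
      · -- only in q: symmetric
        cases hfp : xs.filter p with
        | nil =>
            rw [hfp, pvMerge_nil_left] at hxs
            simp [pvMerge_nil_left, hxs]
        | cons y ys =>
            have hxy : x < y := hp y (by rw [hfp]; exact List.mem_cons_self)
            simp [pvMerge, not_lt_of_gt hxy, (ne_of_lt hxy).symm, hfp ▸ hxs]
      · -- in neither
        exact hxs

-- ===== VERDICT (by name: the statement is the Claim_ definition above) =====
theorem UncommonChars_spec : Claim_equal_UncommonChars := by
  intro A B _
  unfold Spec_UncommonChars UncommonChars UncommonChars_alt
  simp only []
  rw [pvAnsA A B, pvSortedSet A.toList, pvSortedSet B.toList,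
      pvMerge_filter _ _ pvAlpha (by decide)]
  have hfe : pvAlpha.filter (fun c => decide (c ∈ A.toList) != decide (c ∈ B.toList))
      = pvAlpha.filter (fun c => decide (¬ (c ∈ A.toList ↔ c ∈ B.toList))) := by
    apply List.filter_congr
    intro c _
    by_cases ha : c ∈ A.toList <;> by_cases hb : c ∈ B.toList <;> simp [ha, hb]
  rw [hfe]
  rw [PySem.List.sorted_eq_self_of_pairwise _ _
    ((pvPairwiseAlphaFilter _).imp (fun h => le_of_lt h))]
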